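-- pv_equiv track=rewrite | github.com/discolemur/slithering-scripts | report_pairwise_distances.py | trim_fasta
-- ===== SOURCE A (Python) =====
-- def trim(fasta, i) :
--     for key in fasta :
--         del fasta[key][i]
--     return fasta
--
-- def trim_fasta(fasta) :
--     headers = list(fasta.keys())
--     # Convert seqs to lists
--     for header in headers :
--         fasta[header] = list(fasta[header])
--     size = len(fasta[headers[0]])
--     half = len(headers) / 2
--     # Trim front.
--     for i in range(size) :
--         counter = 0
--         for header in headers :
--             if fasta[header][i] == '-' :
--                 counter += 1
--         if counter > half :
--             fasta = trim(fasta, i)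
--         else :
--             break
--     # Trim back.
--     size = len(fasta[headers[0]])
--     for i in range(size) :
--         pos = 0 - i
--         counter = 0
--         for header in headers :
--             if fasta[header][pos] == '-' :
--                 counter += 1
--         if counter > half :
--             fasta = trim(fasta, pos)
--         else :
--             break
--     # Convert seqs back to strings
--     for header in headers :
--         fasta[header] = ''.join(fasta[header])
--     return fasta , len(list(fasta.values())[0])
-- ===== SOURCE B (Python) =====
-- def trim_fasta(fasta):
--     # Simulate the trimming on a single list of surviving column indices,
--     # reading gap counts off the original strings, and rebuild the sequences
--     # once at the end.  Mutates fasta in place.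
--     headers = list(fasta)
--     m = len(headers)
--     seqs = list(fasta.values())
--     size = len(seqs[0])
--
--     def gaps(c):
--         return sum(1 for s in seqs if s[c] == '-')
--
--     cols = list(range(size))
--     for i in range(size):
--         if 2 * gaps(cols[i]) > m:
--             del cols[i]
--         else:
--             break
--     for i in range(len(cols)):
--         pos = -i
--         if 2 * gaps(cols[pos]) > m:
--             del cols[pos]
--         else:
--             break
--     if len(cols) != size:
--         for h in headers:
--             s = fasta[h]
--             fasta[h] = ''.join(s[c] for c in cols)
--     return fasta, len(cols)
-- ===== Notes on version B (the rewrite author's own statement) =====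
-- stated objective: alternative
-- what changed: Instead of converting every sequence to a char list and re-scanning/mutating all n sequences at each trimming step, B simulates the whole deletion process on a single list of surviving column indices (per-column gap counts read off the original strings) and rebuilds the strings once at the end; Pre_ excludes the empty dict and inputs where A raises IndexError, and ragged (unequal-length) dicts on which trimming occurs, where A's per-sequence index shifts are accidental.
-- outside the precondition, e.g. on trim_fasta({'a': '--ABC', 'b': '-DE'}): A returns ({'a': '-ABC', 'b': 'DE'}, 4), B raises IndexError
import Mathlib
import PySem

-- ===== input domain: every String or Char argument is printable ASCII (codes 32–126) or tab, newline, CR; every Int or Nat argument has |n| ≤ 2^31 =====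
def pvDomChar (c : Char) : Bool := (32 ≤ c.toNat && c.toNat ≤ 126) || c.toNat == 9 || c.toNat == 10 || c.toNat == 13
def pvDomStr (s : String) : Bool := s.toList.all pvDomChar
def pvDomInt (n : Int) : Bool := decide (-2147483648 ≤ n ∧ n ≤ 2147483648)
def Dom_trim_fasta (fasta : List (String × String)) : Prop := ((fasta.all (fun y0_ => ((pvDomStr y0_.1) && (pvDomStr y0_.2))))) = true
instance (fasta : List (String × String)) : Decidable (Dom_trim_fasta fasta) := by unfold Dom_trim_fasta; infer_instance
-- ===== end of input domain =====

-- B trims on one list of surviving column indices and rebuilds the strings once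
-- (A re-scans and mutates every sequence at every step); return-value
-- equivalence only — Python A (and B) mutate the argument dict in place.

-- ===== PORT A =====
-- fasta[header][pos]; '?' stands where Python would raise IndexError (such inputs are outside Pre_)
def pvChar (v : List Char) (pos : Int) : Char := (PySem.List.pyGet? v pos).getD '?'

-- 'counter = 0; for header in headers: if fasta[header][i] == '-': counter += 1'
-- (iterating the dict's keys and looking each up is iterating its items)
def counterA (d : List (String × List Char)) (pos : Int) : Nat :=
  d.foldl (fun c kv => if pvChar kv.2 pos == '-' then c + 1 else c) 0

-- 'del v[pos]' (negative pos from the end; out-of-range = IndexError, left unchanged here, outside Pre_)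
def pyDelIdx {α : Type} (v : List α) (pos : Int) : List α :=
  if 0 ≤ pos ∧ pos < v.length then v.eraseIdx pos.toNat
  else if pos < 0 ∧ 0 ≤ pos + v.length then v.eraseIdx (pos + v.length).toNat
  else v

-- 'def trim(fasta, i): for key in fasta: del fasta[key][i]'
def trimA (d : List (String × List Char)) (pos : Int) : List (String × List Char) :=
  d.map (fun kv => (kv.1, pyDelIdx kv.2 pos))

-- 'for i in range(size): … if counter > half: fasta = trim(fasta, i) else: break'
-- (fuel = number of remaining range steps; 'counter > len(headers)/2' is 'm < 2*counter' exactly)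
def frontA (m : Nat) : Nat → Nat → List (String × List Char) → List (String × List Char)
  | 0, _, d => d
  | fuel + 1, i, d =>
    if m < 2 * counterA d (i : Int) then frontA m fuel (i + 1) (trimA d (i : Int)) else d

-- the back loop: 'pos = 0 - i'
def backA (m : Nat) : Nat → Nat → List (String × List Char) → List (String × List Char)
  | 0, _, d => d
  | fuel + 1, i, d =>
    if m < 2 * counterA d (0 - (i : Int)) then backA m fuel (i + 1) (trimA d (0 - (i : Int))) else d

def trim_fasta (fasta : List (String × String)) : (List (String × String)) × Int :=
  -- headers = list(fasta.keys()); for header in headers: fasta[header] = list(fasta[header])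
  let d0 : List (String × List Char) := fasta.map (fun kv => (kv.1, kv.2.toList))
  let m := fasta.length                                   -- len(headers)
  -- size = len(fasta[headers[0]]): headers[0] is the first key, so its lookup is the first value
  let size := ((d0.map Prod.snd).headD []).length
  let d1 := frontA m size 0 d0
  let size2 := ((d1.map Prod.snd).headD []).length
  let d2 := backA m size2 0 d1
  -- for header in headers: fasta[header] = ''.join(fasta[header]); return fasta, len(list(fasta.values())[0])
  (d2.map (fun kv => (kv.1, String.ofList kv.2)), (((d2.map Prod.snd).headD []).length : Int))

-- ===== PORT B =====
-- 'def gaps(c): return sum(1 for s in seqs if s[c] == '-')' ('?' where Python would raise, outside Pre_)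
def gapsB (seqs : List String) (c : Int) : Nat :=
  seqs.foldl (fun a s => if (PySem.Str.pyGet? s c).getD '?' == '-' then a + 1 else a) 0

-- 'for i in range(size): if 2*gaps(cols[i]) > m: del cols[i] else: break'
-- (cols[i] out of range = IndexError in Python, returns unchanged here, outside Pre_)
def frontB (seqs : List String) (m : Nat) : Nat → Nat → List Nat → List Nat
  | 0, _, cols => cols
  | fuel + 1, i, cols =>
    match PySem.List.pyGet? cols (i : Int) with
    | none => cols
    | some c =>
      if m < 2 * gapsB seqs (c : Int) then frontB seqs m fuel (i + 1) (pyDelIdx cols (i : Int))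
      else cols

-- 'for i in range(len(cols)): pos = -i; if 2*gaps(cols[pos]) > m: del cols[pos] else: break'
def backB (seqs : List String) (m : Nat) : Nat → Nat → List Nat → List Nat
  | 0, _, cols => cols
  | fuel + 1, i, cols =>
    match PySem.List.pyGet? cols (-(i : Int)) with
    | none => cols
    | some c =>
      if m < 2 * gapsB seqs (c : Int) then backB seqs m fuel (i + 1) (pyDelIdx cols (-(i : Int)))
      else cols

def trim_fasta_alt (fasta : List (String × String)) : (List (String × String)) × Int :=
  let m := fasta.length                                   -- len(headers)
  let seqs := fasta.map Prod.snd                          -- list(fasta.values())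
  let size := ((seqs.headD "").toList.length)             -- len(seqs[0])
  let cols1 := frontB seqs m size 0 (List.range size)
  let cols2 := backB seqs m cols1.length 0 cols1
  -- if len(cols) != size: for h in headers: fasta[h] = ''.join(s[c] for c in cols)
  let res := if cols2.length ≠ size then
      fasta.map (fun kv => (kv.1, String.ofList (cols2.map (fun (c : Nat) => (PySem.Str.pyGet? kv.2 (c : Int)).getD '?'))))
    else fasta
  (res, (cols2.length : Int))

-- ===== PRECONDITION & SPEC =====
-- gap count of column c over the original sequences (a too-short sequence contributes '?', never '-')
def gapCountAt (vals : List String) (c : Nat) : Nat :=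
  vals.countP (fun s => s.toList.getD c '?' == '-')

-- 'column c is gap-majority'
def pvMaj (vals : List String) (m : Nat) (c : Nat) : Bool := decide (m < 2 * gapCountAt vals c)

-- The front pass visits original columns 0,2,4,… (deleting at index i shifts the rest);
-- pvF = number of columns it deletes, pvS = the columns surviving the front pass.
def pvF (vals : List String) (m size : Nat) : Nat :=
  (List.range (size + 1)).findIdx (fun i => !(decide (2 * i < size) && pvMaj vals m (2 * i)))
def pvS (vals : List String) (m size : Nat) : List Nat :=
  (List.range size).filter (fun c => c % 2 = 1 || 2 * pvF vals m size ≤ c)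

-- front pass returns without IndexError (size ≤ 1 never overruns; otherwise some visited column must fail the majority test)
def pvFrontOk (vals : List String) (m size : Nat) : Bool :=
  size ≤ 1 || (List.range size).any (fun i => decide (2 * i < size) && !pvMaj vals m (2 * i))
-- back pass (step 0 looks at surviving column 0, then at -1, -2, … skipping as it deletes)
def pvBackOk (vals : List String) (m size : Nat) : Bool :=
  let S := pvS vals m size
  let L1 := S.length
  let T := S.tail
  let L2 := L1 - 1
  decide (L1 = 0) || !pvMaj vals m (S.headD 0) || decide (L1 ≤ 2) ||
    (List.range L1).any (fun i => decide (1 ≤ i) && decide (2 * i - 1 ≤ L2) && !pvMaj vals m (T.getD (L2 - (2 * i - 1)) 0))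

-- Pre_ excludes: the empty dict and the overrun inputs, where Python A raises IndexError; and
-- dicts of unequal-length sequences on which trimming occurs — there A walks each sequence's own
-- (shifted, negative) indices, which B, written for an alignment (a rectangular dict), does not match.
def Pre_trim_fasta (fasta : List (String × String)) : Prop :=
  fasta ≠ [] ∧
  (((fasta.map Prod.snd).headD "").toList.length = 0 ∨
   ((fasta.map Prod.snd).all (fun s => s.toList.length ≠ 0) ∧
      ¬ (fasta.length < 2 * gapCountAt (fasta.map Prod.snd) 0)) ∨
   ((∀ kv ∈ fasta, kv.2.toList.length = ((fasta.map Prod.snd).headD "").toList.length) ∧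
      pvFrontOk (fasta.map Prod.snd) fasta.length (((fasta.map Prod.snd).headD "").toList.length) = true ∧
      pvBackOk (fasta.map Prod.snd) fasta.length (((fasta.map Prod.snd).headD "").toList.length) = true))

instance (fasta : List (String × String)) : Decidable (Pre_trim_fasta fasta) := by
  unfold Pre_trim_fasta; infer_instance

def pvWitness_trim_fasta : (List (String × String)) := [("a", "AC"), ("b", "A-")]

def Spec_trim_fasta (fasta : List (String × String)) (out : (List (String × String)) × Int) : Prop := out = trim_fasta_alt fasta
instance (fasta : List (String × String)) (out : (List (String × String)) × Int) : Decidable (Spec_trim_fasta fasta out) := by unfold Spec_trim_fasta; infer_instance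

-- ===== CLAIM (what is proved, stated in full; the proofs are below) =====
def Claim_equal_trim_fasta : Prop := ∀ (fasta : List (String × String)), Dom_trim_fasta fasta → Pre_trim_fasta fasta → Spec_trim_fasta fasta (trim_fasta fasta)

-- ===== LEMMAS AND PROOFS =====

-- a dict state of the trimming process, as one picture: each original sequence
-- restricted to the surviving column indices
def pvApply (fasta : List (String × String)) (cols : List Nat) : List (String × List Char) :=
  fasta.map (fun kv => (kv.1, cols.map (fun c => kv.2.toList.getD c '?')))

theorem foldl_count {α : Type} (p : α → Bool) :
    ∀ (l : List α) (n : Nat), l.foldl (fun c x => if p x then c + 1 else c) n = n + l.countP p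
  | [], n => by simp
  | x :: l, n => by
    by_cases h : p x <;> simp [h, foldl_count p l] <;> omega

theorem counterA_eq_countP (d : List (String × List Char)) (pos : Int) :
    counterA d pos = d.countP (fun kv => pvChar kv.2 pos == '-') := by
  rw [counterA]
  exact (foldl_count (fun kv : String × List Char => pvChar kv.2 pos == '-') d 0).trans
    (Nat.zero_add _)

theorem gapsB_eq_countP (seqs : List String) (c : Int) :
    gapsB seqs c = seqs.countP (fun s => (PySem.Str.pyGet? s c).getD '?' == '-') := by
  rw [gapsB]
  exact (foldl_count (fun s : String => (PySem.Str.pyGet? s c).getD '?' == '-') seqs 0).trans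
    (Nat.zero_add _)

theorem counterA_toList (fasta : List (String × String)) (pos : Int) :
    counterA (fasta.map (fun kv => (kv.1, kv.2.toList))) pos = gapsB (fasta.map Prod.snd) pos := by
  rw [counterA_eq_countP, gapsB_eq_countP, List.countP_map, List.countP_map]
  apply List.countP_congr
  intro kv _
  simp [pvChar]

theorem gapCountAt_eq (vals : List String) (c : Nat) :
    gapCountAt vals c = gapsB vals (c : Int) := by
  rw [gapCountAt, gapsB_eq_countP]
  apply List.countP_congr
  intro s _
  simp [List.getD_eq_getElem?_getD]

theorem pyGet?_map {α β : Type} (f : α → β) (l : List α) (i : Int) :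
    PySem.List.pyGet? (l.map f) i = (PySem.List.pyGet? l i).map f := by
  by_cases h : 0 ≤ i
  · rw [PySem.List.pyGet?_of_nonneg _ h, PySem.List.pyGet?_of_nonneg _ h, List.getElem?_map]
  · by_cases hk : (-i).toNat ≤ l.length
    · have h0 : 0 < (-i).toNat := by omega
      have hi : i = -(((-i).toNat : Nat) : Int) := by omega
      rw [hi, PySem.List.pyGet?_neg_natCast _ _ h0 (by simpa using hk),
          PySem.List.pyGet?_neg_natCast _ _ h0 hk, List.length_map, List.getElem?_map]
    · rw [(PySem.List.pyGet?_eq_none_iff _ _).2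
            (by unfold PySem.Raise.InRange; simp only [List.length_map]; omega),
          (PySem.List.pyGet?_eq_none_iff _ _).2 (by unfold PySem.Raise.InRange; omega)]
      rfl

theorem counterA_apply_none (fasta : List (String × String)) (cols : List Nat) (pos : Int)
    (h : PySem.List.pyGet? cols pos = none) :
    counterA (pvApply fasta cols) pos = 0 := by
  rw [counterA_eq_countP, pvApply, List.countP_map, List.countP_eq_zero.2]
  intro kv _
  simp [pvChar, pyGet?_map, h]

theorem counterA_apply_some (fasta : List (String × String)) (size : Nat)
    (hrect : ∀ kv ∈ fasta, kv.2.toList.length = size)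
    (cols : List Nat) (hcols : ∀ c ∈ cols, c < size) (pos : Int) (c : Nat)
    (h : PySem.List.pyGet? cols pos = some c) :
    counterA (pvApply fasta cols) pos = gapsB (fasta.map Prod.snd) (c : Int) := by
  rw [counterA_eq_countP, pvApply, List.countP_map, gapsB_eq_countP, List.countP_map]
  apply List.countP_congr
  intro kv hkv
  have hc : c < size := hcols c (PySem.List.mem_of_pyGet?_eq_some cols h)
  have hlen : c < kv.2.toList.length := by rw [hrect kv hkv]; exact hc
  simp [pvChar, pyGet?_map, h, List.getElem?_eq_getElem hlen, List.getD_eq_getElem?_getD]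

theorem pyDelIdx_map {α β : Type} (f : α → β) (l : List α) (pos : Int) :
    pyDelIdx (l.map f) pos = (pyDelIdx l pos).map f := by
  simp only [pyDelIdx, List.length_map]
  split_ifs <;> first | rw [List.eraseIdx_map] | rfl

theorem trimA_apply (fasta : List (String × String)) (cols : List Nat) (pos : Int) :
    trimA (pvApply fasta cols) pos = pvApply fasta (pyDelIdx cols pos) := by
  simp [trimA, pvApply, List.map_map, Function.comp_def, pyDelIdx_map]

theorem pyDelIdx_subset {α : Type} (l : List α) (pos : Int) : pyDelIdx l pos ⊆ l := by
  rw [pyDelIdx]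
  split_ifs <;> first | exact List.eraseIdx_subset | exact List.Subset.refl _

theorem pyDelIdx_length_le {α : Type} (l : List α) (pos : Int) :
    (pyDelIdx l pos).length ≤ l.length := by
  rw [pyDelIdx]
  split_ifs <;> first | exact List.length_eraseIdx_le _ _ | exact Nat.le_refl _

theorem pyDelIdx_length_lt {α : Type} (l : List α) (pos : Int) (c : α)
    (h : PySem.List.pyGet? l pos = some c) : (pyDelIdx l pos).length < l.length := by
  have hr : PySem.Raise.InRange l.length pos := by
    by_contra hn
    rw [(PySem.List.pyGet?_eq_none_iff _ _).2 hn] at h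
    simp at h
  unfold PySem.Raise.InRange at hr
  rw [pyDelIdx]
  split_ifs with h1 h2
  · rw [List.length_eraseIdx, if_pos (by omega)]; omega
  · rw [List.length_eraseIdx, if_pos (by omega)]; omega
  · omega

theorem frontAB (fasta : List (String × String)) (size : Nat)
    (hrect : ∀ kv ∈ fasta, kv.2.toList.length = size) :
    ∀ (fuel i : Nat) (cols : List Nat), (∀ c ∈ cols, c < size) →
      frontA fasta.length fuel i (pvApply fasta cols) =
        pvApply fasta (frontB (fasta.map Prod.snd) fasta.length fuel i cols)
  | 0, i, cols, _ => rfl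
  | fuel + 1, i, cols, hcols => by
    simp only [frontA, frontB]
    cases hg : PySem.List.pyGet? cols (i : Int) with
    | none =>
      rw [counterA_apply_none fasta cols (i : Int) hg, if_neg (by omega)]
    | some c =>
      dsimp only
      rw [counterA_apply_some fasta size hrect cols hcols (i : Int) c hg]
      split_ifs with hmaj
      · rw [trimA_apply]
        exact frontAB fasta size hrect fuel (i + 1) (pyDelIdx cols (i : Int))
          (fun x hx => hcols x (pyDelIdx_subset cols (i : Int) hx))
      · rfl

theorem backAB (fasta : List (String × String)) (size : Nat)
    (hrect : ∀ kv ∈ fasta, kv.2.toList.length = size) :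
    ∀ (fuel i : Nat) (cols : List Nat), (∀ c ∈ cols, c < size) →
      backA fasta.length fuel i (pvApply fasta cols) =
        pvApply fasta (backB (fasta.map Prod.snd) fasta.length fuel i cols)
  | 0, i, cols, _ => rfl
  | fuel + 1, i, cols, hcols => by
    simp only [backA, backB]
    have hpos : (0 - (i : Int)) = -(i : Int) := by omega
    cases hg : PySem.List.pyGet? cols (-(i : Int)) with
    | none =>
      rw [hpos, counterA_apply_none fasta cols (-(i : Int)) hg, if_neg (by omega)]
    | some c =>
      dsimp only
      rw [hpos, counterA_apply_some fasta size hrect cols hcols (-(i : Int)) c hg]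
      split_ifs with hmaj
      · rw [trimA_apply]
        exact backAB fasta size hrect fuel (i + 1) (pyDelIdx cols (-(i : Int)))
          (fun x hx => hcols x (pyDelIdx_subset cols (-(i : Int)) hx))
      · rfl

theorem frontB_length_le (seqs : List String) (m : Nat) :
    ∀ (fuel i : Nat) (cols : List Nat), (frontB seqs m fuel i cols).length ≤ cols.length
  | 0, _, _ => Nat.le_refl _
  | fuel + 1, i, cols => by
    simp only [frontB]
    cases PySem.List.pyGet? cols (i : Int) with
    | none => exact Nat.le_refl _
    | some c =>
      dsimp only
      split_ifs
      · exact Nat.le_trans (frontB_length_le seqs m fuel (i + 1) _) (pyDelIdx_length_le _ _)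
      · exact Nat.le_refl _

theorem backB_length_le (seqs : List String) (m : Nat) :
    ∀ (fuel i : Nat) (cols : List Nat), (backB seqs m fuel i cols).length ≤ cols.length
  | 0, _, _ => Nat.le_refl _
  | fuel + 1, i, cols => by
    simp only [backB]
    cases PySem.List.pyGet? cols (-(i : Int)) with
    | none => exact Nat.le_refl _
    | some c =>
      dsimp only
      split_ifs
      · exact Nat.le_trans (backB_length_le seqs m fuel (i + 1) _) (pyDelIdx_length_le _ _)
      · exact Nat.le_refl _

theorem frontB_eq_of_length (seqs : List String) (m : Nat) :
    ∀ (fuel i : Nat) (cols : List Nat),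
      (frontB seqs m fuel i cols).length = cols.length → frontB seqs m fuel i cols = cols
  | 0, _, _, _ => rfl
  | fuel + 1, i, cols, hlen => by
    rw [frontB] at hlen ⊢
    cases hg : PySem.List.pyGet? cols (i : Int) with
    | none => rfl
    | some c =>
      rw [hg] at hlen
      dsimp only at hlen ⊢
      split_ifs at hlen ⊢ with h1
      · exfalso
        have h2 := frontB_length_le seqs m fuel (i + 1) (pyDelIdx cols (i : Int))
        have h3 := pyDelIdx_length_lt cols (i : Int) c hg
        omega
      · rfl

theorem backB_eq_of_length (seqs : List String) (m : Nat) :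
    ∀ (fuel i : Nat) (cols : List Nat),
      (backB seqs m fuel i cols).length = cols.length → backB seqs m fuel i cols = cols
  | 0, _, _, _ => rfl
  | fuel + 1, i, cols, hlen => by
    rw [backB] at hlen ⊢
    cases hg : PySem.List.pyGet? cols (-(i : Int)) with
    | none => rfl
    | some c =>
      rw [hg] at hlen
      dsimp only at hlen ⊢
      split_ifs at hlen ⊢ with h1
      · exfalso
        have h2 := backB_length_le seqs m fuel (i + 1) (pyDelIdx cols (-(i : Int)))
        have h3 := pyDelIdx_length_lt cols (-(i : Int)) c hg
        omega
      · rfl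

theorem frontB_subset (seqs : List String) (m : Nat) :
    ∀ (fuel i : Nat) (cols : List Nat), frontB seqs m fuel i cols ⊆ cols
  | 0, _, _ => List.Subset.refl _
  | fuel + 1, i, cols => by
    simp only [frontB]
    cases PySem.List.pyGet? cols (i : Int) with
    | none => exact List.Subset.refl _
    | some c =>
      dsimp only
      split_ifs
      · exact (frontB_subset seqs m fuel (i + 1) _).trans (pyDelIdx_subset _ _)
      · exact List.Subset.refl _

theorem map_range_getD (l : List Char) :
    (List.range l.length).map (fun c => l.getD c '?') = l := by
  apply List.ext_getElem (by simp)
  intro i h1 h2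
  simp [List.getD_eq_getElem?_getD, List.getElem?_eq_getElem h2]

theorem apply_range (fasta : List (String × String)) (size : Nat)
    (hrect : ∀ kv ∈ fasta, kv.2.toList.length = size) :
    pvApply fasta (List.range size) = fasta.map (fun kv => (kv.1, kv.2.toList)) := by
  apply List.map_congr_left
  intro kv hkv
  rw [← hrect kv hkv, map_range_getD]

theorem map_ofList_toList (fasta : List (String × String)) :
    fasta.map (fun kv => (kv.1, String.ofList kv.2.toList)) = fasta := by
  have h : ∀ kv ∈ fasta, (fun kv : String × String => (kv.1, String.ofList kv.2.toList)) kv = id kv := by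
    intro kv _
    simp [String.ofList_toList]
  rw [List.map_congr_left h, List.map_id]

theorem pvApply_size (kv0 : String × String) (rest : List (String × String)) (cols : List Nat) :
    (((pvApply (kv0 :: rest) cols).map Prod.snd).headD []).length = cols.length := by
  simp [pvApply]

theorem map_range_kv (fasta : List (String × String)) (size : Nat)
    (hrect : ∀ kv ∈ fasta, kv.2.toList.length = size) :
    fasta.map (fun kv => (kv.1, String.ofList ((List.range size).map (fun c => kv.2.toList.getD c '?')))) = fasta := by
  have h : ∀ kv ∈ fasta,
      (fun kv : String × String =>
        (kv.1, String.ofList ((List.range size).map (fun c => kv.2.toList.getD c '?')))) kv = id kv := by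
    intro kv hkv
    simp only [id]
    rw [← hrect kv hkv, map_range_getD, String.ofList_toList]
  rw [List.map_congr_left h, List.map_id]

theorem trim_fasta_size0 (fasta : List (String × String))
    (h : ((fasta.map Prod.snd).headD "").toList.length = 0) :
    trim_fasta fasta = trim_fasta_alt fasta := by
  cases fasta with
  | nil => rfl
  | cons kv0 rest =>
    simp only [List.map_cons, List.headD_cons] at h
    simp only [trim_fasta, trim_fasta_alt, List.map_cons, List.headD_cons, List.map_map,
      Function.comp_def, h, List.range_zero, frontA, frontB, backA, backB, List.length_nil,
      ne_eq, not_true_eq_false, if_false, Prod.mk.injEq, Nat.cast_zero]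
    refine ⟨?_, trivial⟩
    simpa using map_ofList_toList (kv0 :: rest)

theorem trim_fasta_nomaj (fasta : List (String × String)) (hne : fasta ≠ [])
    (hs : ((fasta.map Prod.snd).headD "").toList.length ≠ 0)
    (h : ¬ (fasta.length < 2 * gapCountAt (fasta.map Prod.snd) 0)) :
    trim_fasta fasta = trim_fasta_alt fasta := by
  cases fasta with
  | nil => exact absurd rfl hne
  | cons kv0 rest =>
    simp only [List.map_cons, List.headD_cons] at hs
    obtain ⟨n, hn⟩ := Nat.exists_eq_succ_of_ne_zero hs
    rw [gapCountAt_eq, Nat.cast_zero] at h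
    have hcnt0 : counterA ((kv0 :: rest).map (fun kv => (kv.1, kv.2.toList))) ((0 : Nat) : Int)
        = gapsB ((kv0 :: rest).map Prod.snd) 0 := by
      rw [counterA_toList, Nat.cast_zero]
    have hget0 : PySem.List.pyGet? (List.range (n + 1)) ((0 : Nat) : Int) = some 0 := by
      rw [PySem.List.pyGet?_natCast, List.getElem?_range (by omega)]
    have ef : frontA (kv0 :: rest).length (n + 1) 0
        ((kv0 :: rest).map (fun kv => (kv.1, kv.2.toList)))
        = (kv0 :: rest).map (fun kv => (kv.1, kv.2.toList)) := by
      simp only [frontA]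
      rw [hcnt0, if_neg h]
    have eb : backA (kv0 :: rest).length (n + 1) 0
        ((kv0 :: rest).map (fun kv => (kv.1, kv.2.toList)))
        = (kv0 :: rest).map (fun kv => (kv.1, kv.2.toList)) := by
      simp only [backA]
      rw [show (0 - ((0 : Nat) : Int)) = ((0 : Nat) : Int) by norm_num, hcnt0, if_neg h]
    have efB : frontB ((kv0 :: rest).map Prod.snd) (kv0 :: rest).length (n + 1) 0
        (List.range (n + 1)) = List.range (n + 1) := by
      simp only [frontB]
      rw [hget0]
      simp only [Nat.cast_zero, if_neg h]
    have ebB : backB ((kv0 :: rest).map Prod.snd) (kv0 :: rest).length (n + 1) 0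
        (List.range (n + 1)) = List.range (n + 1) := by
      simp only [backB]
      rw [show (-((0 : Nat) : Int)) = ((0 : Nat) : Int) by norm_num, hget0]
      simp only [Nat.cast_zero, if_neg h]
    simp only [trim_fasta, trim_fasta_alt]
    rw [show ((((kv0 :: rest).map (fun kv => (kv.1, kv.2.toList))).map Prod.snd).headD []).length
          = kv0.2.toList.length from by simp,
        show (((kv0 :: rest).map Prod.snd).headD "").toList.length = kv0.2.toList.length from by simp,
        hn, ef]
    rw [show ((((kv0 :: rest).map (fun kv => (kv.1, kv.2.toList))).map Prod.snd).headD []).length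
          = kv0.2.toList.length from by simp, hn, eb, efB, List.length_range, ebB]
    rw [if_neg (by simp)]
    simp only [Prod.mk.injEq]
    refine ⟨by simp only [List.map_map, Function.comp_def]; exact map_ofList_toList (kv0 :: rest), ?_⟩
    rw [show ((((kv0 :: rest).map (fun kv => (kv.1, kv.2.toList))).map Prod.snd).headD []).length
          = kv0.2.toList.length from by simp, hn, List.length_range]

theorem trim_fasta_rect (fasta : List (String × String))
    (hrect : ∀ kv ∈ fasta, kv.2.toList.length = ((fasta.map Prod.snd).headD "").toList.length) :
    trim_fasta fasta = trim_fasta_alt fasta := by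
  cases fasta with
  | nil => rfl
  | cons kv0 rest =>
    have hrect' : ∀ kv ∈ kv0 :: rest, kv.2.toList.length = kv0.2.toList.length := by
      intro kv hkv
      simpa using hrect kv hkv
    simp only [trim_fasta, trim_fasta_alt]
    rw [show ((((kv0 :: rest).map (fun kv => (kv.1, kv.2.toList))).map Prod.snd).headD []).length
          = kv0.2.toList.length from by simp,
        show (((kv0 :: rest).map Prod.snd).headD "").toList.length = kv0.2.toList.length from by simp]
    set N := kv0.2.toList.length with hN
    rw [show (kv0 :: rest).map (fun kv => (kv.1, kv.2.toList)) = pvApply (kv0 :: rest) (List.range N)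
          from (apply_range _ N hrect').symm]
    rw [frontAB (kv0 :: rest) N hrect' N 0 (List.range N) (fun c hc => List.mem_range.1 hc)]
    set C1 := frontB ((kv0 :: rest).map Prod.snd) (kv0 :: rest).length N 0 (List.range N) with hC1
    rw [pvApply_size]
    rw [backAB (kv0 :: rest) N hrect' C1.length 0 C1
        (fun c hc => List.mem_range.1 (frontB_subset _ _ _ _ _ hc))]
    set C2 := backB ((kv0 :: rest).map Prod.snd) (kv0 :: rest).length C1.length 0 C1 with hC2
    rw [pvApply_size]
    have hfst : (pvApply (kv0 :: rest) C2).map (fun kv => (kv.1, String.ofList kv.2))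
        = (kv0 :: rest).map (fun kv =>
            (kv.1, String.ofList (C2.map (fun c => kv.2.toList.getD c '?')))) := by
      simp [pvApply, List.map_map, Function.comp_def]
    rw [hfst]
    simp only [Prod.mk.injEq]
    refine ⟨?_, trivial⟩
    by_cases hc : C2.length = N
    · rw [if_neg (not_not_intro hc)]
      have hle1 : C1.length ≤ N := by
        have := frontB_length_le ((kv0 :: rest).map Prod.snd) (kv0 :: rest).length N 0 (List.range N)
        rw [← hC1, List.length_range] at this
        exact this
      have hle2 : C2.length ≤ C1.length := by
        have := backB_length_le ((kv0 :: rest).map Prod.snd) (kv0 :: rest).length C1.length 0 C1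
        rw [← hC2] at this
        exact this
      have e1 : C1 = List.range N := by
        rw [hC1]
        exact frontB_eq_of_length _ _ _ _ _ (by rw [← hC1, List.length_range]; omega)
      have e2 : C2 = C1 := by
        rw [hC2]
        exact backB_eq_of_length _ _ _ _ _ (by rw [← hC2]; omega)
      rw [e2, e1, map_range_kv (kv0 :: rest) N hrect']
    · rw [if_pos hc]
      apply List.map_congr_left
      intro kv _
      have : (fun c : Nat => (PySem.Str.pyGet? kv.2 (c : Int)).getD '?')
          = (fun c : Nat => kv.2.toList.getD c '?') := by
        funext c
        simp [List.getD_eq_getElem?_getD]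
      rw [this]

-- ===== VERDICT (by name: the statement is the Claim_ definition above) =====
theorem trim_fasta_spec : Claim_equal_trim_fasta := by
  intro fasta _ hpre
  unfold Spec_trim_fasta
  obtain ⟨hne, h0 | ⟨_, hnm⟩ | ⟨hrect, _, _⟩⟩ := hpre
  · exact trim_fasta_size0 fasta h0
  · by_cases hs : ((fasta.map Prod.snd).headD "").toList.length = 0
    · exact (trim_fasta_size0 fasta hs)
    · exact (trim_fasta_nomaj fasta hne hs hnm)
  · exact (trim_fasta_rect fasta hrect)
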